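-- pv_equiv track=rewrite | github.com/wf9a5m75/leetcode | implement-strstr/solution.py | makeNgramHash
-- ===== SOURCE A (Python) =====
-- def makeNgramHash(A, n):
--     mem = {}
--     for i in range(0, len(A) - n + 1):
--         key = A[i: i + n]
--         if key not in mem:
--             mem[key] = [i]
--         else:
--             mem[key].append(i)
--     return mem
-- ===== SOURCE B (Python) =====
-- def makeNgramHash(A, n):
--     grams = [A[i: i + n] for i in range(0, len(A) - n + 1)]
--     out = {}
--     for k in grams:
--         if k not in out:
--             out[k] = [i for i, g in enumerate(grams) if g == k]
--     return out
-- ===== Notes on version B (the rewrite author's own statement) =====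
-- stated objective: alternative
-- what changed: Instead of A's single pass that appends each position into a growing dict entry, B materializes the n-gram list once, then for each first-seen key gathers all its positions by a full enumerate-scan of that list.
import Mathlib
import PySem

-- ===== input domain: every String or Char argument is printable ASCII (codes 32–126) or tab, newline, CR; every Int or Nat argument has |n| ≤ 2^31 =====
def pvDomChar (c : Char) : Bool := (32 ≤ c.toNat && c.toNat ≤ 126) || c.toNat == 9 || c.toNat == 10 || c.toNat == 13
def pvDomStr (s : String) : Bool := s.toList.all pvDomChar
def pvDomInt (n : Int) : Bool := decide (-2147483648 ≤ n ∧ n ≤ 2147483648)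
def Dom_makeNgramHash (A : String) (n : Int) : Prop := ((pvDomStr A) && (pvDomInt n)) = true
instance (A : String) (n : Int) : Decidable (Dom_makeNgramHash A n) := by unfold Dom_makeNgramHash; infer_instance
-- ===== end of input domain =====

-- B builds the n-gram list once and, skipping already-seen keys, gathers each key's
-- positions by a per-key scan with enumerate, instead of A's incremental dict append
-- (objective: alternative decomposition; not faster).


-- ===== PORT A =====
def makeNgramHash (A : String) (n : Int) : List (String × List Int) :=
  ((PySem.List.pyRange 0 (PySem.Str.len A - n + 1) 1).foldl
    (fun mem i =>
      let key := PySem.Str.slice A (some i) (some (i + n))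
      if ! mem.contains key then mem.insert key [i]
      else mem.modify key [] (fun v => v ++ [i]))
    PySem.Dict.empty).items

-- ===== PORT B =====
def makeNgramHash_alt (A : String) (n : Int) : List (String × List Int) :=
  let grams := (PySem.List.pyRange 0 (PySem.Str.len A - n + 1) 1).map
    (fun i => PySem.Str.slice A (some i) (some (i + n)))
  (grams.foldl
    (fun out k =>
      if ! out.contains k then
        out.insert k (((PySem.List.enumerate grams 0).filter (fun p => p.2 == k)).map (fun p => p.1))
      else out)
    PySem.Dict.empty).items

-- ===== PRECONDITION & SPEC =====
def Spec_makeNgramHash (A : String) (n : Int) (out : List (String × List Int)) : Prop := out = makeNgramHash_alt A n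
instance (A : String) (n : Int) (out : List (String × List Int)) : Decidable (Spec_makeNgramHash A n out) := by unfold Spec_makeNgramHash; infer_instance

-- ===== CLAIM (what is proved, stated in full; the proofs are below) =====
def Claim_equal_makeNgramHash : Prop := ∀ (A : String) (n : Int), Dom_makeNgramHash A n → Spec_makeNgramHash A n (makeNgramHash A n)

-- ===== LEMMAS AND PROOFS =====

-- enumerate of a range comprehension pairs each range value with its image
lemma enum_map_range {α : Type} (f : Int → α) (a b : Int) :
    PySem.List.enumerate ((PySem.List.pyRange a b 1).map f) a
      = (PySem.List.pyRange a b 1).map (fun i => (i, f i)) := by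
  generalize h : (b - a).toNat = m
  induction m generalizing a with
  | zero =>
    rw [PySem.List.pyRange_one_eq_nil (by omega)]
    simp [PySem.List.enumerate_nil]
  | succ m ih =>
    rw [PySem.List.pyRange_one_cons (by omega)]
    simp only [List.map_cons, PySem.List.enumerate_cons]
    rw [ih (a + 1) (by omega)]

-- A's loop body is exactly Dict.modify (the two branches agree with modify)
lemma stepA_eq_modify {κ : Type} [BEq κ] [LawfulBEq κ] (d : PySem.Dict κ (List Int)) (k : κ) (i : Int) :
    (if ! d.contains k then d.insert k [i] else d.modify k [] (fun v => v ++ [i]))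
      = d.modify k [] (fun v => v ++ [i]) := by
  by_cases h : d.contains k
  · simp [h]
  · simp only [Bool.not_eq_true] at h
    simp [h, PySem.Dict.modify, PySem.Dict.getD_of_not_contains d ([] : List Int) h]

-- B's skip-duplicates insertion loop: distinct keys in first-occurrence order
lemma foldl_skip_insert {ν : Type} (val : String → ν) (ks : List String) :
    (ks.foldl (fun d k => if ! d.contains k then d.insert k (val k) else d) PySem.Dict.empty).items
      = (PySem.Set.ofList ks).map (fun k => (k, val k)) := by
  induction ks using List.reverseRecOn with
  | nil => rfl
  | append_singleton ks x ih =>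
    rw [List.foldl_append, List.foldl_cons, List.foldl_nil,
        PySem.Set.ofList_append_singleton]
    set d := ks.foldl (fun d k => if ! d.contains k then d.insert k (val k) else d) PySem.Dict.empty with hd
    have hkeys : d.keys = PySem.Set.ofList ks := by
      show d.items.map (fun p => p.1) = _
      rw [ih, List.map_map]
      simp [Function.comp_def]
    by_cases hx : x ∈ PySem.Set.ofList ks
    · have hc : d.contains x = true := by
        rw [PySem.Dict.contains_iff_mem_keys, hkeys]; exact hx
      rw [PySem.Set.add_of_mem hx]
      simp [hc, ih]
    · have hc : d.contains x = false := by
        rw [← Bool.not_eq_true, PySem.Dict.contains_iff_mem_keys, hkeys]; exact hx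
      rw [PySem.Set.add_of_not_mem hx]
      simp only [hc, Bool.not_false, if_true]
      rw [PySem.Dict.items_insert_of_not_contains d (val x) hc, ih, List.map_append,
          List.map_cons, List.map_nil]

-- A's grouping loop, characterized as a map over the distinct keys
lemma itemsA_eq (f : Int → String) (L : List Int) :
    (L.foldl (fun mem i =>
        if ! mem.contains (f i) then mem.insert (f i) [i]
        else mem.modify (f i) [] (fun v => v ++ [i])) PySem.Dict.empty).items
      = (PySem.Set.ofList (L.map f)).map (fun k => (k, L.filter (fun i => f i == k))) := by
  have hstep : L.foldl (fun mem i =>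
        if ! mem.contains (f i) then mem.insert (f i) [i]
        else mem.modify (f i) [] (fun v => v ++ [i])) PySem.Dict.empty
      = L.foldl (fun mem i => mem.modify (f i) [] (fun v => v ++ [i])) PySem.Dict.empty := by
    apply PySem.List.foldl_congr_mem
    intro acc i _
    exact stepA_eq_modify acc (f i) i
  rw [hstep]
  set d := L.foldl (fun mem i => mem.modify (f i) [] (fun v => v ++ [i])) PySem.Dict.empty with hd
  have hkeys : d.keys = PySem.Set.ofList (L.map f) := by
    rw [hd, PySem.Dict.keys_foldl_modify_key L f [] (fun _ i => (fun v => v ++ [i]))]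
    simp [PySem.Set.update_nil_left]
  have hnodup : d.keys.Nodup := by
    rw [hkeys]; exact PySem.Set.nodup_ofList _
  have hgetD : ∀ k, d.getD k [] = L.filter (fun i => f i == k) := by
    intro k
    have : d = (L.map (fun i => ((f i, i) : String × Int))).foldl
        (fun d p => d.modify p.1 [] (fun v => v ++ [p.2])) PySem.Dict.empty := by
      rw [hd, List.foldl_map]
    rw [this, PySem.Dict.getD_foldl_modify_append]
    simp [List.filter_map, Function.comp_def]
  rw [PySem.Dict.items_eq_map_keys d hnodup [], hkeys]
  apply List.map_congr_left
  intro k _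
  rw [hgetD]

theorem ports_agree (A : String) (n : Int) : makeNgramHash A n = makeNgramHash_alt A n := by
  unfold makeNgramHash makeNgramHash_alt
  set f : Int → String := fun i => PySem.Str.slice A (some i) (some (i + n)) with hf
  set L := PySem.List.pyRange 0 (PySem.Str.len A - n + 1) 1 with hL
  rw [itemsA_eq f L,
      foldl_skip_insert (fun k => (((PySem.List.enumerate (L.map f) 0).filter
        (fun p => p.2 == k)).map (fun p => p.1))) (L.map f)]
  apply List.map_congr_left
  intro k _
  have h0 : PySem.List.enumerate (L.map f) 0 = L.map (fun i => (i, f i)) := by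
    rw [hL]; exact enum_map_range f 0 (PySem.Str.len A - n + 1)
  rw [h0]
  simp [List.filter_map, Function.comp_def]

-- ===== VERDICT (by name: the statement is the Claim_ definition above) =====
theorem makeNgramHash_spec : Claim_equal_makeNgramHash := by
  intro A n _
  unfold Spec_makeNgramHash
  exact ports_agree A n
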